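-- pv_equiv track=rewrite | github.com/anonymousException/renpy-translator | renpy_translate.py | isAllPunctuations
-- ===== SOURCE A (Python) =====
-- import string
--
-- def isAllPunctuations(s):
--     punc = string.punctuation
--     for i in s:
--         if(i in punc):
--             continue
--         else:
--             return False
--     return True
-- ===== SOURCE B (Python) =====
-- import string
--
-- def isAllPunctuations(s):
--     # Strip punctuation from both ends; the whole string was punctuation iff nothing is left.
--     return s.strip(string.punctuation) == ''
-- ===== Notes on version B (the rewrite author's own statement) =====
-- stated objective: simpler
-- what changed: Replaced A's per-character membership loop with early return by a single library call: strip all punctuation characters from both ends of s and test whether the remainder is the empty string.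
import Mathlib
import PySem

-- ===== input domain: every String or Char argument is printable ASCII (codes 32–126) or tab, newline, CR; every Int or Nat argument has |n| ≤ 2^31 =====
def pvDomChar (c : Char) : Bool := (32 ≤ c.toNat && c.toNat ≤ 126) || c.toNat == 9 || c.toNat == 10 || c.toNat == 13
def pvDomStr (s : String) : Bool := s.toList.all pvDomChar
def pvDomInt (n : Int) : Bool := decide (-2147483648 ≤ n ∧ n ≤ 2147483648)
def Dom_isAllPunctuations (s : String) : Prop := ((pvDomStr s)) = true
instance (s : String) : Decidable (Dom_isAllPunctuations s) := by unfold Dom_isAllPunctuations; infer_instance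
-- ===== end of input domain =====

-- B replaces A's per-character scan with one strip call: strip punctuation from both ends and test emptiness (simpler); same return value.

-- ===== PORT A =====
-- string.punctuation
def punctuationStr : String := "!\"#$%&'()*+,-./:;<=>?@[\\]^_`{|}~"

-- the for-loop of A: walk the characters, return False on the first non-punctuation one
def isAllPunctLoop : List Char → Bool
  | [] => true
  | c :: cs => if punctuationStr.toList.contains c then isAllPunctLoop cs else false

def isAllPunctuations (s : String) : Bool := isAllPunctLoop s.toList

-- ===== PORT B =====
-- s.strip(string.punctuation) == ''
def isAllPunctuations_alt (s : String) : Bool :=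
  PySem.Str.stripChars s punctuationStr == ""

-- ===== PRECONDITION & SPEC =====
def Spec_isAllPunctuations (s : String) (out : Bool) : Prop := out = isAllPunctuations_alt s
instance (s : String) (out : Bool) : Decidable (Spec_isAllPunctuations s out) := by unfold Spec_isAllPunctuations; infer_instance

-- ===== CLAIM (what is proved, stated in full; the proofs are below) =====
def Claim_equal_isAllPunctuations : Prop := ∀ (s : String), Dom_isAllPunctuations s → Spec_isAllPunctuations s (isAllPunctuations s)

-- ===== LEMMAS AND PROOFS =====
theorem isAllPunctLoop_iff (l : List Char) :
    isAllPunctLoop l = true ↔ ∀ c ∈ l, punctuationStr.toList.contains c = true := by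
  induction l with
  | nil => simp [isAllPunctLoop]
  | cons c cs ih => by_cases h : punctuationStr.toList.contains c = true <;>
      simp [isAllPunctLoop, ih]

theorem stripChars_eq_nil_iff (l p : List Char) :
    PySem.Chars.stripChars l p = [] ↔ ∀ c ∈ l, p.contains c = true := by
  unfold PySem.Chars.stripChars
  simp only [List.reverse_eq_nil_iff, List.dropWhile_eq_nil_iff, List.mem_reverse]
  constructor
  · intro h c hc
    have hsplit : c ∈ l.takeWhile (fun c => p.contains c) ∨
        c ∈ l.dropWhile (fun c => p.contains c) := by
      rw [← List.mem_append, List.takeWhile_append_dropWhile]; exact hc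
    rcases hsplit with h1 | h1
    · exact List.mem_takeWhile_imp h1
    · exact h c h1
  · intro h c hc
    exact h c (List.dropWhile_sublist _ |>.mem hc)

theorem alt_empty_iff (s : String) :
    isAllPunctuations_alt s = true ↔
      ∀ c ∈ s.toList, punctuationStr.toList.contains c = true := by
  unfold isAllPunctuations_alt
  rw [beq_iff_eq, ← stripChars_eq_nil_iff s.toList punctuationStr.toList]
  constructor
  · intro h
    have := congrArg String.toList h
    simpa [PySem.Str.toList_stripChars] using this
  · intro h
    apply String.toList_injective
    simpa [PySem.Str.toList_stripChars] using h

-- ===== VERDICT (by name: the statement is the Claim_ definition above) =====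
theorem isAllPunctuations_spec : Claim_equal_isAllPunctuations := by
  intro s _
  unfold Spec_isAllPunctuations isAllPunctuations
  rcases h : isAllPunctLoop s.toList with _ | _
  · symm
    rw [Bool.eq_false_iff]
    intro hb
    have := (isAllPunctLoop_iff s.toList).2 ((alt_empty_iff s).1 hb)
    simp [this] at h
  · symm
    exact (alt_empty_iff s).2 ((isAllPunctLoop_iff s.toList).1 h)
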